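-- pv_equiv track=rewrite | github.com/LIANGQINGYUAN/DivoT5 | pretraining/src/pre_training/mask_diff_utils.py | get_span_mask_from_mask
-- ===== SOURCE A (Python) =====
-- def get_span_mask_from_mask(mask, tokens):
--     SPECIAL_ID = 0
--     spmask = []
--     for i in range(len(mask)):
--         if i==0:
--             if mask[i] == '<mask>' and SPECIAL_ID<99:
--                 spmask.append(f"<extra_id_{SPECIAL_ID}>")
--                 SPECIAL_ID+=1
--             else:
--                 spmask.append(tokens[i])
--         else:
--             if mask[i] == '<mask>' and mask[i-1] != mask[i] and SPECIAL_ID<99: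
--                 spmask.append(f"<extra_id_{SPECIAL_ID}>")
--                 SPECIAL_ID+=1
--             elif mask[i] != '<mask>':
--                 spmask.append(tokens[i])
--     return spmask
-- ===== SOURCE B (Python) =====
-- def get_span_mask_from_mask(mask, tokens):
--     spmask = []
--     k = 0
--     i = 0
--     n = len(mask)
--     while i < n:
--         if mask[i] == '<mask>':
--             j = i
--             while j < n and mask[j] == '<mask>':
--                 j += 1
--             if k < 99:
--                 spmask.append(f"<extra_id_{k}>")
--                 k += 1
--             i = j
--         else:
--             spmask.append(tokens[i])
--             i += 1
--     return spmask
-- ===== Notes on version B (the rewrite author's own statement) =====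
-- stated objective: alternative
-- what changed: B scans whole maximal runs of '<mask>' with an inner skip loop (one sentinel per run), instead of A's per-element adjacency test mask[i-1]!=mask[i]; non-mask positions are copied by original index.
import Mathlib
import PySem

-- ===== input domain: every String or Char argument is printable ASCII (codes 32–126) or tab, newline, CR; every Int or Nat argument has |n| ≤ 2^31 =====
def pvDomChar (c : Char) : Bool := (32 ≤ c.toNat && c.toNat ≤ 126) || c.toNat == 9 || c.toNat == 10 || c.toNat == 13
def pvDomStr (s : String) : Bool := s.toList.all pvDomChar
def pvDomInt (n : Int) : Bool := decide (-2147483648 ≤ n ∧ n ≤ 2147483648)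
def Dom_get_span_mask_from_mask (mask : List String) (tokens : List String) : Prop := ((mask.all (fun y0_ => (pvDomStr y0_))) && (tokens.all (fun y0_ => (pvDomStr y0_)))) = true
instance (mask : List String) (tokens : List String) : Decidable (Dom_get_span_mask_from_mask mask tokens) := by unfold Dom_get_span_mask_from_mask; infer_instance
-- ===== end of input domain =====

-- B processes maximal '<mask>' runs with an inner skip loop (one sentinel per run) instead of
-- A's per-element adjacency test; same return value (equivalence is about the return value).

-- ===== PORT A =====
-- A's for-loop over range(len(mask)) as the obvious index recursion over the same
-- state (spmask, SPECIAL_ID); in-range accesses mask[i], mask[i-1], tokens[i] are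
-- List.getD (exact for indices 0 ≤ i < length; tokens[i] out of range raises in
-- Python and is excluded by Pre_).
def aGo (mask : List String) (tokens : List String) (i : Nat) (st : List String × Int) : List String :=
  if h : i < mask.length then
    if i = 0 then
      if mask.getD i "" = "<mask>" ∧ st.2 < 99 then
        aGo mask tokens (i+1) (st.1 ++ ["<extra_id_" ++ PySem.Int.toStr st.2 ++ ">"], st.2 + 1)
      else
        aGo mask tokens (i+1) (st.1 ++ [tokens.getD i ""], st.2)
    else
      if mask.getD i "" = "<mask>" ∧ mask.getD (i-1) "" ≠ mask.getD i "" ∧ st.2 < 99 then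
        aGo mask tokens (i+1) (st.1 ++ ["<extra_id_" ++ PySem.Int.toStr st.2 ++ ">"], st.2 + 1)
      else if mask.getD i "" ≠ "<mask>" then
        aGo mask tokens (i+1) (st.1 ++ [tokens.getD i ""], st.2)
      else
        aGo mask tokens (i+1) st
  else st.1
termination_by mask.length - i

def get_span_mask_from_mask (mask : List String) (tokens : List String) : List String :=
  aGo mask tokens 0 ([], 0)

-- ===== PORT B =====
-- Source B's inner `while j < n and mask[j] == '<mask>'` skip loop.
def skipRun (mask : List String) (j : Nat) : Nat :=
  if j < mask.length ∧ mask.getD j "" = "<mask>" then skipRun mask (j+1) else j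
termination_by mask.length - j
decreasing_by omega

theorem skipRun_ge (mask : List String) (j : Nat) : j ≤ skipRun mask j := by
  unfold skipRun
  split
  · exact le_trans (Nat.le_succ j) (skipRun_ge mask (j+1))
  · exact le_refl j
termination_by mask.length - j
decreasing_by omega

-- Source B's outer while loop: run-at-a-time recursion over (i, k, spmask).
def bGo (mask : List String) (tokens : List String) (i : Nat) (k : Int) (out : List String) : List String :=
  if h : i < mask.length then
    if hm : mask.getD i "" = "<mask>" then
      let j := skipRun mask i
      if k < 99 then
        bGo mask tokens j (k+1) (out ++ ["<extra_id_" ++ PySem.Int.toStr k ++ ">"])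
      else bGo mask tokens j k out
    else bGo mask tokens (i+1) k (out ++ [tokens.getD i ""])
  else out
termination_by mask.length - i
decreasing_by
  · have h1 : skipRun mask i = skipRun mask (i+1) := by
      rw [skipRun, if_pos ⟨h, hm⟩]
    have := skipRun_ge mask (i+1)
    omega
  · have h1 : skipRun mask i = skipRun mask (i+1) := by
      rw [skipRun, if_pos ⟨h, hm⟩]
    have := skipRun_ge mask (i+1)
    omega
  · omega

def get_span_mask_from_mask_alt (mask : List String) (tokens : List String) : List String :=
  bGo mask tokens 0 0 []

-- ===== PRECONDITION & SPEC =====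
-- A raises IndexError iff some non-'<mask>' position i has i ≥ len(tokens); Pre_ excludes exactly those inputs.
def Pre_get_span_mask_from_mask (mask : List String) (tokens : List String) : Prop :=
  ∀ i, i < mask.length → mask.getD i "" ≠ "<mask>" → i < tokens.length
instance (mask : List String) (tokens : List String) : Decidable (Pre_get_span_mask_from_mask mask tokens) := by
  unfold Pre_get_span_mask_from_mask; infer_instance

def pvWitness_get_span_mask_from_mask : List String × List String :=
  (["<mask>", "<mask>", "a", "<mask>", "b"], ["t0", "t1", "t2", "t3", "t4"])

def Spec_get_span_mask_from_mask (mask : List String) (tokens : List String) (out : List String) : Prop := out = get_span_mask_from_mask_alt mask tokens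
instance (mask : List String) (tokens : List String) (out : List String) : Decidable (Spec_get_span_mask_from_mask mask tokens out) := by unfold Spec_get_span_mask_from_mask; infer_instance

-- ===== CLAIM (what is proved, stated in full; the proofs are below) =====
def Claim_equal_get_span_mask_from_mask : Prop := ∀ (mask : List String) (tokens : List String), Dom_get_span_mask_from_mask mask tokens → Pre_get_span_mask_from_mask mask tokens → Spec_get_span_mask_from_mask mask tokens (get_span_mask_from_mask mask tokens)

-- ===== LEMMAS AND PROOFS =====

-- Past a skip loop, the current position is not '<mask>' (or is past the end, where getD = "").
theorem skipRun_not_mask (mask : List String) (j : Nat) :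
    mask.getD (skipRun mask j) "" ≠ "<mask>" := by
  unfold skipRun
  split
  · exact skipRun_not_mask mask (j+1)
  · rename_i h
    by_cases hj : j < mask.length
    · intro hc; exact h ⟨hj, hc⟩
    · have he : mask.getD j "" = "" := by
        rw [List.getD_eq_getElem?_getD, List.getElem?_eq_none (by omega)]; rfl
      rw [he]; intro hc; exact absurd hc.symm (by decide)
termination_by mask.length - j
decreasing_by omega

-- Inside a '<mask>' run (previous element is '<mask>'), A skips every element until the run ends.
theorem aGo_run (mask tokens : List String) :
    ∀ m i st, mask.length - i ≤ m → 1 ≤ i → mask.getD (i-1) "" = "<mask>" →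
      aGo mask tokens i st = aGo mask tokens (skipRun mask i) st := by
  intro m
  induction m with
  | zero =>
    intro i st hm _ _
    have hi : ¬ i < mask.length := by omega
    rw [skipRun, if_neg (fun hc => hi hc.1)]
  | succ m ih =>
    intro i st hm h1 hprev
    by_cases hi : i < mask.length
    · by_cases hmask : mask.getD i "" = "<mask>"
      · have hskip : skipRun mask i = skipRun mask (i+1) := by
          rw [skipRun, if_pos ⟨hi, hmask⟩]
        have h0 : ¬ i = 0 := by omega
        rw [aGo, dif_pos hi, if_neg h0,
            if_neg (fun hc => hc.2.1 (by rw [hprev, hmask])),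
            if_neg (fun hc => hc hmask), hskip]
        exact ih (i+1) st (by omega) (by omega) (by simpa using hmask)
      · rw [skipRun, if_neg (fun hc => hmask hc.2)]
    · rw [skipRun, if_neg (fun hc => hi hc.1)]

-- Main invariant: at any "fresh" position (start, or not in the middle of a mask run),
-- A's remaining loop equals B's remaining loop.
theorem main_inv (mask tokens : List String) :
    ∀ m i out k, mask.length - i ≤ m →
      (i = 0 → k < 99) →
      (i = 0 ∨ ¬(mask.getD (i-1) "" = "<mask>" ∧ mask.getD i "" = "<mask>")) →
      aGo mask tokens i (out, k) = bGo mask tokens i k out := by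
  intro m
  induction m with
  | zero =>
    intro i out k hm _ _
    have hi : ¬ i < mask.length := by omega
    rw [aGo, bGo, dif_neg hi, dif_neg hi]
  | succ m ih =>
    intro i out k hm hk hfresh
    by_cases hi : i < mask.length
    · by_cases hmask : mask.getD i "" = "<mask>"
      · -- run start
        have hskip : skipRun mask i = skipRun mask (i+1) := by
          rw [skipRun, if_pos ⟨hi, hmask⟩]
        have hge := skipRun_ge mask (i+1)
        have hfuel : mask.length - skipRun mask (i+1) ≤ m := by omega
        have hnm := skipRun_not_mask mask (i+1)
        have hstep : ∀ st, aGo mask tokens (i+1) st = aGo mask tokens (skipRun mask (i+1)) st := by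
          intro st
          by_cases hi1 : i + 1 < mask.length
          · exact aGo_run mask tokens (mask.length - (i+1)) (i+1) st (le_refl _) (by omega)
              (by simpa using hmask)
          · rw [skipRun, if_neg (fun hc => hi1 hc.1)]
        have hfin : ∀ out' k',
            aGo mask tokens (skipRun mask (i+1)) (out', k') =
            bGo mask tokens (skipRun mask (i+1)) k' out' := by
          intro out' k'
          exact ih (skipRun mask (i+1)) out' k' hfuel (by omega)
            (Or.inr (fun hc => hnm hc.2))
        by_cases hklt : k < 99
        · -- emit a sentinel
          have hA : aGo mask tokens i (out, k) =
              aGo mask tokens (i+1) (out ++ ["<extra_id_" ++ PySem.Int.toStr k ++ ">"], k+1) := by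
            by_cases h0 : i = 0
            · subst h0
              rw [aGo, dif_pos hi, if_pos rfl, if_pos ⟨hmask, hklt⟩]
            · have hprev : mask.getD (i-1) "" ≠ "<mask>" := by
                rcases hfresh with h | h
                · omega
                · intro hc; exact h ⟨hc, hmask⟩
              rw [aGo, dif_pos hi, if_neg h0,
                  if_pos ⟨hmask, fun hc => hprev (by rw [hc, hmask]), hklt⟩]
          rw [hA, hstep, bGo]
          simp only [dif_pos hi, dif_pos hmask, if_pos hklt, hskip]
          exact hfin _ (k+1)
        · -- cap reached: emit nothing for the run
          have h0' : ¬ i = 0 := fun h0 => hklt (hk h0)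
          have hprev : mask.getD (i-1) "" ≠ "<mask>" := by
            rcases hfresh with h | h
            · omega
            · intro hc; exact h ⟨hc, hmask⟩
          have hA : aGo mask tokens i (out, k) = aGo mask tokens (i+1) (out, k) := by
            rw [aGo, dif_pos hi, if_neg h0',
                if_neg (fun hc => hklt hc.2.2), if_neg (fun hc => hc hmask)]
          rw [hA, hstep, bGo]
          simp only [dif_pos hi, dif_pos hmask, if_neg hklt, hskip]
          exact hfin _ k
      · -- non-mask position: copy tokens[i]
        have hA : aGo mask tokens i (out, k) =
            aGo mask tokens (i+1) (out ++ [tokens.getD i ""], k) := by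
          by_cases h0 : i = 0
          · subst h0
            rw [aGo, dif_pos hi, if_pos rfl, if_neg (fun hc => hmask hc.1)]
          · rw [aGo, dif_pos hi, if_neg h0,
                if_neg (fun hc => hmask hc.1), if_pos hmask]
        rw [hA, bGo]
        simp only [dif_pos hi, dif_neg hmask]
        exact ih (i+1) (out ++ [tokens.getD i ""]) k (by omega) (by omega)
          (Or.inr (fun hc => hmask (by simpa using hc.1)))
    · rw [aGo, bGo, dif_neg hi, dif_neg hi]

-- ===== VERDICT (by name: the statement is the Claim_ definition above) =====
theorem get_span_mask_from_mask_spec : Claim_equal_get_span_mask_from_mask := by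
  intro mask tokens _ _
  unfold Spec_get_span_mask_from_mask get_span_mask_from_mask get_span_mask_from_mask_alt
  exact main_inv mask tokens mask.length 0 [] 0 (by omega) (fun _ => by omega) (Or.inl rfl)
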